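-- pv_equiv track=rewrite | github.com/p-priyanshu04/Algorithm-Design | Custom Hash Text Search/custom_hash_text_search.py | convert
-- ===== SOURCE A (Python) =====
-- def convert(word):
--   num = 0
--   fact = 1
--   for i in range(len(word)):
--     x = ord(word[i])-ord('a') + 1
--     num += x*fact
--     fact *= 26
--   return num
-- ===== SOURCE B (Python) =====
-- def convert(word):
--   num = 0
--   for c in reversed(word):
--     num = num*26 + (ord(c) - ord('a') + 1)
--   return num
-- ===== Notes on version B (the rewrite author's own statement) =====
-- stated objective: idiomatic
-- what changed: Replaces the forward loop that maintains an explicit running power-of-26 accumulator with Horner's method iterating over the characters in reverse order, so no power variable is kept.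
import Mathlib
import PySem

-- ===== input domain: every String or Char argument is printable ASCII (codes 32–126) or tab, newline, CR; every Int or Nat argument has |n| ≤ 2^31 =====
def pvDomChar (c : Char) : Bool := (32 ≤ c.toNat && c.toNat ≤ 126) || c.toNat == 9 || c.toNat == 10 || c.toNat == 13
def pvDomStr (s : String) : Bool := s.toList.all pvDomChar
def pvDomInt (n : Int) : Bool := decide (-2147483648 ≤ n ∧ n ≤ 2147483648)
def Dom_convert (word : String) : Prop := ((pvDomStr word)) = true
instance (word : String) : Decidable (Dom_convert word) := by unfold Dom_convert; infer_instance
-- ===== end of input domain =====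

-- B re-implements the base-26 hash by Horner's method over the reversed string (no power accumulator); same value on every string.

-- ===== PORT A =====
-- for i in range(len(word)): x = ord(word[i])-ord('a')+1; num += x*fact; fact *= 26
def convert (word : String) : Int :=
  let cs := word.toList
  let st :=
    (PySem.List.pyRange 0 (cs.length : Int) 1).foldl
      (fun (p : Int × Int) i =>
        -- x = ord(word[i]) - ord('a') + 1, inlined
        (p.1 + ((Int.ofNat (PySem.List.pyGetD cs i ' ').toNat) - 97 + 1) * p.2, p.2 * 26))
      (0, 1)
  st.1

-- ===== PORT B =====
-- num = 0; for c in reversed(word): num = num*26 + (ord(c)-ord('a')+1)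
def convert_alt (word : String) : Int :=
  word.toList.reverse.foldl
    (fun (num : Int) c => num * 26 + ((Int.ofNat c.toNat) - 97 + 1)) 0

-- ===== PRECONDITION & SPEC =====
def Spec_convert (word : String) (out : Int) : Prop := out = convert_alt word
instance (word : String) (out : Int) : Decidable (Spec_convert word out) := by unfold Spec_convert; infer_instance

-- ===== CLAIM (what is proved, stated in full; the proofs are below) =====
def Claim_equal_convert : Prop := ∀ (word : String), Dom_convert word → Spec_convert word (convert word)

-- ===== LEMMAS AND PROOFS =====

-- value of a character
def pvVal (c : Char) : Int := (Int.ofNat c.toNat) - 97 + 1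

-- B as a foldr (Horner over the reverse = foldr with first char at weight 1)
theorem pvAlt_foldr (l : List Char) :
    l.reverse.foldl (fun (num : Int) c => num * 26 + pvVal c) 0
      = l.foldr (fun c num => num * 26 + pvVal c) 0 := by
  rw [List.foldl_reverse]

-- A's loop invariant: result = num + fact * (Horner value of the remaining list)
theorem pvA_inv (l : List Char) (num fact : Int) :
    (l.foldl (fun (p : Int × Int) c => (p.1 + pvVal c * p.2, p.2 * 26)) (num, fact)).1
      = num + fact * l.foldr (fun c n => n * 26 + pvVal c) 0 := by
  induction l generalizing num fact with
  | nil => simp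
  | cons c t ih =>
    simp only [List.foldl_cons, List.foldr_cons, ih]
    ring

theorem convert_spec : Claim_equal_convert := by
  intro word _
  simp only [Spec_convert, convert, convert_alt]
  rw [PySem.List.foldl_pyRange_zero_pyGetD' word.toList ' '
        (fun (p : Int × Int) c => (p.1 + ((Int.ofNat c.toNat) - 97 + 1) * p.2, p.2 * 26)) (0, 1)]
  have h := pvA_inv word.toList 0 1
  have h2 := pvAlt_foldr word.toList
  simp only [pvVal] at h h2
  rw [h, h2]
  ring
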